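-- pv_equiv track=rewrite | github.com/slotThe/advent | aoc2018/python-solutions/day05.py | solve
-- ===== SOURCE A (Python) =====
-- def solve(inp: str) -> int:
--     res = []
--     for y in inp:
--         if res == [] or y.swapcase() != res[-1]:
--             res.append(y)
--         else:  # Aa aA
--             res.pop()
--     return len(res)
-- ===== SOURCE B (Python) =====
-- def _remove_first_pair(units):
--     # first adjacent reacting pair (same swapcase test as the original); None if none
--     for i in range(len(units) - 1):
--         if units[i + 1].swapcase() == units[i]:
--             return units[:i] + units[i + 2:]
--     return None
--
--
-- def solve(inp: str) -> int:
--     units = list(inp)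
--     while True:
--         nxt = _remove_first_pair(units)
--         if nxt is None:
--             return len(units)
--         units = nxt
-- ===== Notes on version B (the rewrite author's own statement) =====
-- stated objective: alternative
-- what changed: Replaces the single left-to-right stack pass with a fixpoint loop that repeatedly finds and deletes the first adjacent reacting pair (same swapcase-equality test) until none remains, then returns the length.
import Mathlib
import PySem

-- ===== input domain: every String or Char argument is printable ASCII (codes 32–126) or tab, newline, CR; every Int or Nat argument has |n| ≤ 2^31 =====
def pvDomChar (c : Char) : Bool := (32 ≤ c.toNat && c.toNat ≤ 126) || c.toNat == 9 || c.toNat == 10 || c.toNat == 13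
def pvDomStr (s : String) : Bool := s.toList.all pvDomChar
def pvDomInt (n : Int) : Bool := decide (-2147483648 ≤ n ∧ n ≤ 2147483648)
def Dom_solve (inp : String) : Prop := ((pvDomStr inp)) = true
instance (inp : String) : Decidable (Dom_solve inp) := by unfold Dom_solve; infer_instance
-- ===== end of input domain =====

-- B replaces the single stack pass by a fixpoint loop deleting the first adjacent
-- reacting pair until none remains (alternative decomposition, not faster).


-- ===== PORT A =====
-- y.swapcase() on a single character (exact on the ASCII domain: lower→upper, upper→lower, else unchanged)
def swapc (c : Char) : Char :=
  if PySem.Chars.islower c then PySem.Chars.upperChar c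
  else if PySem.Chars.isupper c then PySem.Chars.lowerChar c
  else c

-- body of A's for-loop: res[-1] via pyGet?, res.append(y) = res ++ [y], res.pop() = dropLast
def solveStep (res : List Char) (y : Char) : List Char :=
  if res = [] ∨ PySem.List.pyGet? res (-1) ≠ some (swapc y) then res ++ [y] else res.dropLast

def solve (inp : String) : Int :=
  ((inp.toList.foldl solveStep []).length : Int)

-- ===== PORT B =====
-- _remove_first_pair: scan for the first i with units[i+1].swapcase() == units[i];
-- return units[:i] + units[i+2:], or none if no pair reacts
def removePair : List Char → Option (List Char)
  | a :: b :: rest => if swapc b = a then some rest else (removePair (b :: rest)).map (a :: ·)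
  | _ => none

-- needed by reduceLoop's termination
theorem removePair_length {l l' : List Char} (h : removePair l = some l') :
    l'.length + 2 = l.length := by
  induction l generalizing l' with
  | nil => simp [removePair] at h
  | cons a t ih =>
    match t with
    | [] => simp [removePair] at h
    | b :: rest =>
      simp only [removePair] at h
      split at h
      · cases h; simp
      · cases hm : removePair (b :: rest) with
        | none => rw [hm] at h; simp at h
        | some m =>
          rw [hm] at h
          simp only [Option.map_some] at h
          cases h
          have := ih hm
          simp at this ⊢
          omega

-- the while-loop of B: repeat until _remove_first_pair returns None
def reduceLoop (units : List Char) : List Char :=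
  match h : removePair units with
  | none => units
  | some nxt => reduceLoop nxt
termination_by units.length
decreasing_by have := removePair_length h; omega

def solve_alt (inp : String) : Int :=
  ((reduceLoop inp.toList).length : Int)

-- ===== PRECONDITION & SPEC =====
def Spec_solve (inp : String) (out : Int) : Prop := out = solve_alt inp
instance (inp : String) (out : Int) : Decidable (Spec_solve inp out) := by unfold Spec_solve; infer_instance

-- ===== CLAIM (what is proved, stated in full; the proofs are below) =====
def Claim_equal_solve : Prop := ∀ (inp : String), Dom_solve inp → Spec_solve inp (solve inp)

-- ===== LEMMAS AND PROOFS =====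

-- swapcase is an involution (on every Char, by PySem's ASCII-exact definitions)
theorem char_le_iff (a b : Char) : a ≤ b ↔ a.toNat ≤ b.toNat := by
  simp [Char.le_def, UInt32.le_iff_toNat_le]

theorem toNat_ofNat_small {n : Nat} (h : n < 128) : (Char.ofNat n).toNat = n := by
  simp [Char.toNat_ofNat, Nat.isValidChar]
  omega

theorem islower_iff (c : Char) : PySem.Chars.islower c = true ↔ 97 ≤ c.toNat ∧ c.toNat ≤ 122 := by
  unfold PySem.Chars.islower
  rw [Bool.and_eq_true, decide_eq_true_iff, decide_eq_true_iff, char_le_iff, char_le_iff]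
  have ha : ('a' : Char).toNat = 97 := rfl
  have hz : ('z' : Char).toNat = 122 := rfl
  rw [ha, hz]

theorem isupper_iff (c : Char) : PySem.Chars.isupper c = true ↔ 65 ≤ c.toNat ∧ c.toNat ≤ 90 := by
  unfold PySem.Chars.isupper
  rw [Bool.and_eq_true, decide_eq_true_iff, decide_eq_true_iff, char_le_iff, char_le_iff]
  have ha : ('A' : Char).toNat = 65 := rfl
  have hz : ('Z' : Char).toNat = 90 := rfl
  rw [ha, hz]

theorem swapc_lower {c : Char} (h : 97 ≤ c.toNat ∧ c.toNat ≤ 122) :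
    swapc c = Char.ofNat (c.toNat - 32) := by
  have hl := (islower_iff c).2 h
  simp [swapc, PySem.Chars.upperChar, hl]

theorem swapc_upper {c : Char} (h : 65 ≤ c.toNat ∧ c.toNat ≤ 90) :
    swapc c = Char.ofNat (c.toNat + 32) := by
  have hu := (isupper_iff c).2 h
  have hl : PySem.Chars.islower c = false := by
    rw [← Bool.not_eq_true, islower_iff]; omega
  simp [swapc, PySem.Chars.lowerChar, hl, hu]

theorem swapc_other {c : Char} (h1 : ¬(97 ≤ c.toNat ∧ c.toNat ≤ 122))
    (h2 : ¬(65 ≤ c.toNat ∧ c.toNat ≤ 90)) : swapc c = c := by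
  have hl : PySem.Chars.islower c = false := by rw [← Bool.not_eq_true, islower_iff]; exact h1
  have hu : PySem.Chars.isupper c = false := by rw [← Bool.not_eq_true, isupper_iff]; exact h2
  simp [swapc, hl, hu]

theorem swapc_invol (c : Char) : swapc (swapc c) = c := by
  by_cases hl : 97 ≤ c.toNat ∧ c.toNat ≤ 122
  · rw [swapc_lower hl]
    have hd : (Char.ofNat (c.toNat - 32)).toNat = c.toNat - 32 := toNat_ofNat_small (by omega)
    rw [swapc_upper (by rw [hd]; omega), hd]
    have he : c.toNat - 32 + 32 = c.toNat := by omega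
    rw [he, Char.ofNat_toNat]
  · by_cases hu : 65 ≤ c.toNat ∧ c.toNat ≤ 90
    · rw [swapc_upper hu]
      have hd : (Char.ofNat (c.toNat + 32)).toNat = c.toNat + 32 := toNat_ofNat_small (by omega)
      rw [swapc_lower (by rw [hd]; omega), hd]
      have he : c.toNat + 32 - 32 = c.toNat := by omega
      rw [he, Char.ofNat_toNat]
    · rw [swapc_other hl hu, swapc_other hl hu]

-- the stack step of A, with the stack kept head-first (reversed)
def srev (S : List Char) (a : Char) : List Char :=
  match S with
  | [] => [a]
  | x :: S' => if swapc a = x then S' else a :: x :: S'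

theorem solveStep_eq_srev (S : List Char) (a : Char) :
    solveStep S.reverse a = (srev S a).reverse := by
  cases S with
  | nil => simp [solveStep, srev]
  | cons x S' =>
    have hg : PySem.List.pyGet? (S'.reverse ++ [x]) (-1) = some x :=
      PySem.List.pyGet?_neg_one_append_singleton S'.reverse x
    by_cases h : swapc a = x
    · simp [solveStep, srev, hg, h]
    · simp [solveStep, srev, hg, h, Ne.symm h]

theorem foldl_solveStep_eq (l S : List Char) :
    List.foldl solveStep S.reverse l = (List.foldl srev S l).reverse := by
  induction l generalizing S with
  | nil => rfl
  | cons a t ih => simpa [solveStep_eq_srev] using ih (srev S a)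

-- invariant of the stack: no two adjacent entries react
def StackInv (S : List Char) : Prop := List.IsChain (fun n o => swapc n ≠ o) S

theorem srev_inv {S : List Char} (h : StackInv S) (a : Char) : StackInv (srev S a) := by
  cases S with
  | nil => exact List.isChain_singleton a
  | cons x S' =>
    simp only [srev, StackInv]
    split_ifs with hx
    · exact ((List.isChain_cons).1 h).2
    · exact (List.isChain_cons_cons).2 ⟨hx, h⟩

theorem srev_srev {S : List Char} {a b : Char} (h : StackInv S) (hab : swapc b = a) :
    srev (srev S a) b = S := by
  have hba : b = swapc a := by rw [← hab, swapc_invol]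
  cases S with
  | nil => simp [srev, hab]
  | cons x S' =>
    by_cases hx : swapc a = x
    · -- a reacts with the top x; then b = swapcase a = x is pushed back
      cases S' with
      | nil => simp [srev, hx, hba.trans hx]
      | cons y S'' =>
        have hxy : swapc x ≠ y := List.IsChain.rel_head (R := fun n o => swapc n ≠ o) h
        have hby : ¬ swapc b = y := by
          rw [hab]; intro hay
          exact hxy (by rw [← hx, swapc_invol, hay])
        simp [srev, hx, hxy, hba.trans hx]
    · -- a is pushed; then b reacts with it
      simp [srev, hx, hab]

theorem foldl_srev_removePair {t t' : List Char} (h : removePair t = some t')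
    {S : List Char} (hS : StackInv S) :
    List.foldl srev S t = List.foldl srev S t' := by
  induction t generalizing t' S with
  | nil => simp [removePair] at h
  | cons a t ih =>
    match t with
    | [] => simp [removePair] at h
    | b :: rest =>
      simp only [removePair] at h
      split at h
      · cases h
        simp only [List.foldl_cons]
        rw [show srev (srev S a) b = S from srev_srev hS (by assumption)]
      · cases hm : removePair (b :: rest) with
        | none => rw [hm] at h; simp at h
        | some m =>
          rw [hm] at h
          simp only [Option.map_some] at h
          cases h
          simp only [List.foldl_cons]
          exact ih hm (srev_inv hS a)

theorem foldl_srev_none {t : List Char} (h : removePair t = none) (S : List Char)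
    (hc : ∀ y ∈ t.head?, ∀ x ∈ S.head?, swapc y ≠ x) :
    List.foldl srev S t = t.reverse ++ S := by
  induction t generalizing S with
  | nil => simp
  | cons a t ih =>
    have hpush : srev S a = a :: S := by
      cases S with
      | nil => rfl
      | cons x S' =>
        have : swapc a ≠ x := hc a (by simp) x (by simp)
        simp [srev, this]
    match t with
    | [] => simp [hpush]
    | b :: rest =>
      simp only [removePair] at h
      have hba : ¬ swapc b = a := by
        intro hba; rw [if_pos hba] at h; simp at h
      rw [if_neg hba] at h
      have hrest : removePair (b :: rest) = none := by
        cases hm : removePair (b :: rest) with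
        | none => rfl
        | some m => rw [hm] at h; simp at h
      rw [List.foldl_cons, hpush]
      rw [ih hrest (a :: S) (by simpa using hba)]
      simp

theorem reduceLoop_spec (u : List Char) :
    removePair (reduceLoop u) = none ∧
      List.foldl srev [] (reduceLoop u) = List.foldl srev [] u := by
  rw [reduceLoop.eq_def]
  split
  next h => exact ⟨h, rfl⟩
  next nxt h =>
    have ih := reduceLoop_spec nxt
    exact ⟨ih.1, ih.2.trans (foldl_srev_removePair h (List.isChain_nil)).symm⟩
termination_by u.length
decreasing_by rename_i nxt _h1 _h2 heq; have := removePair_length heq; omega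

-- ===== VERDICT (by name: the statement is the Claim_ definition above) =====
theorem solve_spec : Claim_equal_solve := by
  intro inp _
  unfold Spec_solve solve solve_alt
  have h1 : List.foldl solveStep [] inp.toList
      = (List.foldl srev [] inp.toList).reverse := foldl_solveStep_eq inp.toList []
  have h2 := (reduceLoop_spec inp.toList).2
  have h3 : List.foldl srev [] (reduceLoop inp.toList) = (reduceLoop inp.toList).reverse := by
    simpa using foldl_srev_none (reduceLoop_spec inp.toList).1 [] (by simp)
  rw [h1, ← h2, h3]
  simp
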